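-- pv_equiv track=rewrite | github.com/fridaySong3/DailyAlgo | string/1235_학생 번호.py | same_num
-- ===== SOURCE A (Python) =====
-- def same_num(s1, s2):
--     i = 0
--     for c1, c2 in zip(s1, s2):
--         if c1 == c2:
--             i += 1
--         else:
--             break
--     return i
-- ===== SOURCE B (Python) =====
-- def same_num(s1, s2):
--     # Binary search for the largest k with s1[:k] == s2[:k];
--     # the predicate is monotone (a prefix of a matching prefix matches).
--     lo, hi = 0, min(len(s1), len(s2))
--     while lo < hi:
--         mid = (lo + hi + 1) // 2
--         if s1[:mid] == s2[:mid]: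
--             lo = mid
--         else:
--             hi = mid - 1
--     return lo
-- ===== Notes on version B (the rewrite author's own statement) =====
-- stated objective: alternative
-- what changed: Replaces the linear counting scan over zip(s1,s2) with a binary search for the largest k such that s1[:k] == s2[:k], exploiting that slice-prefix equality is a monotone predicate.
import Mathlib
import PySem

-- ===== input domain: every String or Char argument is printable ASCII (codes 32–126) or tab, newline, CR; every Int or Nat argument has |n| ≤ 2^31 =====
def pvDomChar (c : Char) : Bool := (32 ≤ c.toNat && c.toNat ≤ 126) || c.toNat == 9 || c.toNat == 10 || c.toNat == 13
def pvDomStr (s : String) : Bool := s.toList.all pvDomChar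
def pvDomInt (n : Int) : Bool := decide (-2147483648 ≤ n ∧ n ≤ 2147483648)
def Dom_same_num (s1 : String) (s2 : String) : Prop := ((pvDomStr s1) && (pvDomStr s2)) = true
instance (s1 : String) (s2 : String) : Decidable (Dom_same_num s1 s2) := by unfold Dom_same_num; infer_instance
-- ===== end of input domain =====

-- B binary-searches for the largest k with s1[:k] == s2[:k] (a monotone predicate); A counts matching positions in a linear scan with break. Equivalent return values.

-- ===== PORT A =====
-- the for-loop over zip with break, as structural recursion carrying the counter i
def sameNumLoop : List (Char × Char) → Int → Int
  | [], i => i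
  | (c1, c2) :: rest, i => if c1 = c2 then sameNumLoop rest (i + 1) else i

def same_num (s1 : String) (s2 : String) : Int :=
  sameNumLoop (s1.toList.zip s2.toList) 0

-- ===== PORT B =====
-- the while-loop of the bisection; lo, hi are Python ints that stay ≥ 0, carried as Nat.
-- s1[:mid] with 0 ≤ mid is exactly List.take mid of the characters.
def sameNumBS (a b : List Char) (lo hi : Nat) : Nat :=
  if h : lo < hi then
    let mid := (lo + hi + 1) / 2
    if a.take mid = b.take mid then
      sameNumBS a b mid hi
    else
      sameNumBS a b lo (mid - 1)
  else lo
termination_by hi - lo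
decreasing_by all_goals omega

def same_num_alt (s1 : String) (s2 : String) : Int :=
  (sameNumBS s1.toList s2.toList 0 (min s1.toList.length s2.toList.length) : Int)

-- ===== PRECONDITION & SPEC =====
def Spec_same_num (s1 : String) (s2 : String) (out : Int) : Prop := out = same_num_alt s1 s2
instance (s1 : String) (s2 : String) (out : Int) : Decidable (Spec_same_num s1 s2 out) := by unfold Spec_same_num; infer_instance

-- ===== CLAIM (what is proved, stated in full; the proofs are below) =====
def Claim_equal_same_num : Prop := ∀ (s1 : String) (s2 : String), Dom_same_num s1 s2 → Spec_same_num s1 s2 (same_num s1 s2)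

-- ===== LEMMAS AND PROOFS =====
-- the common value: length of the matching prefix of the zip
def pvL (a b : List Char) : Nat := ((a.zip b).takeWhile (fun p => p.1 = p.2)).length

theorem pvL_le_min (a b : List Char) : pvL a b ≤ min a.length b.length := by
  have h : pvL a b ≤ (a.zip b).length := by
    unfold pvL
    induction a.zip b with
    | nil => simp
    | cons p r ih => by_cases h : p.1 = p.2 <;> simp [h]; omega
  simpa [List.length_zip] using h

-- prefix equality is exactly "k ≤ pvL" (for k within both lengths)
theorem take_eq_iff (a : List Char) : ∀ (b : List Char) (k : Nat),
    k ≤ min a.length b.length → (a.take k = b.take k ↔ k ≤ pvL a b) := by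
  induction a with
  | nil =>
    intro b k hk
    simp at hk
    subst hk; simp
  | cons x a ih =>
    intro b k hk
    cases b with
    | nil => simp at hk; subst hk; simp
    | cons y b =>
      cases k with
      | zero => simp
      | succ n =>
        simp at hk
        by_cases hxy : x = y
        · subst hxy
          have hrec := ih b n (by omega)
          have hpv : pvL (x :: a) (x :: b) = pvL a b + 1 := by
            simp [pvL]
          simp only [List.take_succ_cons, List.cons.injEq, true_and, hpv]
          rw [hrec]
          omega
        · have hpv : pvL (x :: a) (y :: b) = 0 := by
            simp [pvL, hxy]
          simp [List.take_succ_cons, hxy, hpv]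

-- the bisection returns pvL whenever it brackets it
theorem sameNumBS_eq (a b : List Char) : ∀ (n lo hi : Nat), hi - lo ≤ n →
    lo ≤ pvL a b → pvL a b ≤ hi → hi ≤ min a.length b.length →
    sameNumBS a b lo hi = pvL a b := by
  intro n
  induction n with
  | zero =>
    intro lo hi hn hlo hhi hm
    have : ¬ lo < hi := by omega
    rw [sameNumBS]; simp [this]; omega
  | succ n ih =>
    intro lo hi hn hlo hhi hm
    rw [sameNumBS]
    by_cases h : lo < hi
    · simp only [h, dif_pos]
      set mid := (lo + hi + 1) / 2 with hmid
      have h1 : lo < mid := by omega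
      have h2 : mid ≤ hi := by omega
      by_cases ht : a.take mid = b.take mid
      · have hk : mid ≤ pvL a b := (take_eq_iff a b mid (by omega)).1 ht
        simp only [ht, if_pos]
        exact ih mid hi (by omega) hk hhi hm
      · have hk : ¬ mid ≤ pvL a b := fun hkk => ht ((take_eq_iff a b mid (by omega)).2 hkk)
        simp only [ht, if_false]
        exact ih lo (mid - 1) (by omega) hlo (by omega) (by omega)
    · simp [h]; omega

-- A's loop counts pvL
theorem sameNumLoop_eq (zs : List (Char × Char)) (i : Int) :
    sameNumLoop zs i = i + (zs.takeWhile (fun p => p.1 = p.2)).length := by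
  induction zs generalizing i with
  | nil => simp [sameNumLoop]
  | cons p rest ih =>
    by_cases h : p.1 = p.2
    · simp [sameNumLoop, List.takeWhile, h, ih]; omega
    · simp [sameNumLoop, List.takeWhile, h]

-- ===== VERDICT (by name: the statement is the Claim_ definition above) =====
theorem same_num_spec : Claim_equal_same_num := by
  intro s1 s2 _
  unfold Spec_same_num same_num same_num_alt
  have hA := sameNumLoop_eq (s1.toList.zip s2.toList) 0
  have hB := sameNumBS_eq s1.toList s2.toList (min s1.toList.length s2.toList.length) 0
      (min s1.toList.length s2.toList.length) (by omega) (by omega)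
      (pvL_le_min _ _) (le_refl _)
  rw [hA, hB]
  simp [pvL]
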